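-- pv_equiv track=rewrite | github.com/innersme/BigData_summer | word_module.py | isdifferent
-- ===== SOURCE A (Python) =====
-- def isdifferent(wordone,wordtwo):
--     i = 0
--     num = []
--     for n in range(len(wordone)):
--         if wordone[n] == wordtwo[n]:
--             i = i + 1
--         else:
--             num.append(i)
--     return num
-- ===== SOURCE B (Python) =====
-- def isdifferent(wordone, wordtwo):
--     matches = [wordone[n] == wordtwo[n] for n in range(len(wordone))]
--     prefix = []
--     total = 0
--     for m in matches:
--         total += m
--         prefix.append(total)
--     return [prefix[n] for n in range(len(matches)) if not matches[n]]
-- ===== Notes on version B (the rewrite author's own statement) =====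
-- stated objective: alternative
-- what changed: B replaces A's single stateful loop (running counter mutated and appended at each mismatch) by three separate passes: a boolean match array, its inclusive prefix sums, and a filtering pass that picks the prefix sum at each mismatch index.
import Mathlib
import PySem

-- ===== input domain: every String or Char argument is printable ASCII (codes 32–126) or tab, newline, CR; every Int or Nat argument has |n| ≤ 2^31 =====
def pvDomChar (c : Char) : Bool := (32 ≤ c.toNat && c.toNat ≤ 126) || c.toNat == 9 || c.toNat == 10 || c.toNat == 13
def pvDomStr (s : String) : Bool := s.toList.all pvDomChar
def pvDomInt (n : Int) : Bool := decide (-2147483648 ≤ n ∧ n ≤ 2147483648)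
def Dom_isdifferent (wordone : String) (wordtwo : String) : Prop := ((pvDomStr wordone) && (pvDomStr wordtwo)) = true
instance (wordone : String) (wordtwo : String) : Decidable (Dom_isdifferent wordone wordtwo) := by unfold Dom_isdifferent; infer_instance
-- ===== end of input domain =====

-- B re-decomposes A's single stateful loop into three passes (match array, prefix sums, filter);
-- equal cost, different structure. Pre_ excludes exactly the inputs where Python raises IndexError.

-- ===== PORT A =====
-- literal port of A: one loop over range(len(wordone)) carrying (i, num);
-- wordtwo[n] is ported with pyGetD, exact under Pre_ (in range everywhere the Python returns).
def isdifferent (wordone : String) (wordtwo : String) : List Int :=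
  ((PySem.List.pyRange 0 (PySem.List.len wordone.toList) 1).foldl
    (fun (st : Int × List Int) n =>
      if PySem.List.pyGetD wordone.toList n ' ' == PySem.List.pyGetD wordtwo.toList n ' '
      then (st.1 + 1, st.2)
      else (st.1, st.2 ++ [st.1]))
    (0, [])).2

-- ===== PORT B =====
-- literal port of Source B: boolean match array, inclusive prefix sums, filtering pass.
def isdifferent_alt (wordone : String) (wordtwo : String) : List Int :=
  let matchesL := (PySem.List.pyRange 0 (PySem.List.len wordone.toList) 1).map
    (fun n => PySem.List.pyGetD wordone.toList n ' ' == PySem.List.pyGetD wordtwo.toList n ' ')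
  let prefixL := (matchesL.foldl
    (fun (st : Int × List Int) m =>
      (st.1 + (if m then 1 else 0), st.2 ++ [st.1 + (if m then 1 else 0)]))
    ((0 : Int), ([] : List Int))).2
  (PySem.List.pyRange 0 (PySem.List.len matchesL) 1).foldl
    (fun acc n => if PySem.List.pyGetD matchesL n false then acc
                  else acc ++ [PySem.List.pyGetD prefixL n 0]) []

-- ===== PRECONDITION & SPEC =====
-- Pre_ excludes exactly the inputs where Python A (and B) raise IndexError: wordtwo shorter than wordone.
def Pre_isdifferent (wordone : String) (wordtwo : String) : Prop :=
  wordone.toList.length ≤ wordtwo.toList.length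
instance (wordone : String) (wordtwo : String) : Decidable (Pre_isdifferent wordone wordtwo) := by
  unfold Pre_isdifferent; infer_instance
def pvWitness_isdifferent : String × String := ("abcd", "axcy")

def Spec_isdifferent (wordone : String) (wordtwo : String) (out : List Int) : Prop := out = isdifferent_alt wordone wordtwo
instance (wordone : String) (wordtwo : String) (out : List Int) : Decidable (Spec_isdifferent wordone wordtwo out) := by unfold Spec_isdifferent; infer_instance

-- ===== CLAIM (what is proved, stated in full; the proofs are below) =====
def Claim_equal_isdifferent : Prop := ∀ (wordone : String) (wordtwo : String), Dom_isdifferent wordone wordtwo → Pre_isdifferent wordone wordtwo → Spec_isdifferent wordone wordtwo (isdifferent wordone wordtwo)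

-- ===== LEMMAS AND PROOFS =====

/-- count of `true`s, as an Int. -/
def pvCnt (bs : List Bool) : Int := ((bs.map (fun m => if m then (1:Int) else 0)).sum)

/-- reference result: at each `false` emit the running count of `true`s. -/
def pvMism : List Bool → Int → List Int
  | [], _ => []
  | true :: bs, i => pvMism bs (i + 1)
  | false :: bs, i => i :: pvMism bs i

/-- inclusive prefix sums of the 0/1 view starting at t. -/
def pvPre : List Bool → Int → List Int
  | [], _ => []
  | m :: bs, t => (t + (if m then 1 else 0)) :: pvPre bs (t + (if m then 1 else 0))

theorem pvFoldA (bs : List Bool) : ∀ (i : Int) (acc : List Int),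
    bs.foldl (fun (st : Int × List Int) m =>
      if m then (st.1 + 1, st.2) else (st.1, st.2 ++ [st.1])) (i, acc)
      = (i + pvCnt bs, acc ++ pvMism bs i) := by
  induction bs with
  | nil => intro i acc; simp [pvCnt, pvMism]
  | cons m bs ih =>
    intro i acc
    cases m <;> simp [pvCnt, pvMism, ih] <;> omega

theorem pvFoldP (bs : List Bool) : ∀ (t : Int) (acc : List Int),
    bs.foldl (fun (st : Int × List Int) m =>
      (st.1 + (if m then 1 else 0), st.2 ++ [st.1 + (if m then 1 else 0)])) (t, acc)
      = (t + pvCnt bs, acc ++ pvPre bs t) := by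
  induction bs with
  | nil => intro t acc; simp [pvCnt, pvPre]
  | cons m bs ih =>
    intro t acc
    cases m <;> simp [pvCnt, pvPre, ih] <;> omega

theorem pvPre_length (bs : List Bool) : ∀ t, (pvPre bs t).length = bs.length := by
  induction bs with
  | nil => intro t; rfl
  | cons m bs ih => intro t; simp [pvPre, ih]

theorem pvMism_snoc (bs : List Bool) (m : Bool) : ∀ i,
    pvMism (bs ++ [m]) i = pvMism bs i ++ (if m then [] else [i + pvCnt bs]) := by
  induction bs with
  | nil => intro i; cases m <;> simp [pvMism, pvCnt]
  | cons b bs ih =>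
    intro i
    cases b <;> simp [pvMism, pvCnt, ih] <;> cases m <;> simp <;> ring_nf

theorem pvPre_snoc (bs : List Bool) (m : Bool) : ∀ t,
    pvPre (bs ++ [m]) t = pvPre bs t ++ [t + pvCnt bs + (if m then 1 else 0)] := by
  induction bs with
  | nil => intro t; simp [pvPre, pvCnt]
  | cons b bs ih =>
    intro t
    simp [pvPre, pvCnt, ih]
    ring_nf

theorem pvCore (bs : List Bool) :
    ((List.range bs.length).filter (fun k => !bs.getD k false)).map
      (fun k => (pvPre bs 0).getD k 0) = pvMism bs 0 := by
  induction bs using List.reverseRecOn with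
  | nil => rfl
  | append_singleton bs m ih =>
    rw [pvMism_snoc]
    have hlen : (bs ++ [m]).length = bs.length + 1 := by simp
    rw [hlen, List.range_succ, List.filter_append, List.map_append]
    have hfilt : (List.range bs.length).filter (fun k => !(bs ++ [m]).getD k false)
        = (List.range bs.length).filter (fun k => !bs.getD k false) := by
      apply List.filter_congr
      intro k hk
      rw [List.mem_range] at hk
      simp [List.getD, List.getElem?_append_left hk]
    have hmap : ∀ l : List Nat, (∀ k ∈ l, k < bs.length) →
        l.map (fun k => (pvPre (bs ++ [m]) 0).getD k 0) = l.map (fun k => (pvPre bs 0).getD k 0) := by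
      intro l hl
      apply List.map_congr_left
      intro k hk
      rw [pvPre_snoc]
      have hk' : k < (pvPre bs 0).length := by rw [pvPre_length]; exact hl k hk
      simp [List.getD, List.getElem?_append_left hk']
    rw [hfilt, hmap _ (by intro k hk; exact (List.mem_filter.mp hk).1 |> List.mem_range.mp), ih]
    congr 1
    have hget : (bs ++ [m]).getD bs.length false = m := by
      simp [List.getD]
    have hpre : (pvPre (bs ++ [m]) 0).getD bs.length 0 = pvCnt bs + (if m then 1 else 0) := by
      rw [pvPre_snoc]
      have : (pvPre bs 0).length = bs.length := pvPre_length bs 0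
      simp [List.getD, this]
    cases m <;> simp only [List.getD_eq_getElem?_getD] at hget hpre ⊢
    · simp [hpre]
    · simp [hget, hpre]

-- ===== VERDICT (by name: the statement is the Claim_ definition above) =====
theorem isdifferent_spec : Claim_equal_isdifferent := by
  intro w1 w2 _ _
  unfold Spec_isdifferent isdifferent isdifferent_alt
  set l1 := w1.toList with hl1
  set l2 := w2.toList with hl2
  set bs := (List.range l1.length).map
    (fun k => l1.getD k ' ' == l2.getD k ' ') with hbs
  -- rewrite both pyRange folds/maps to List.range folds over bs
  have hrange : PySem.List.pyRange 0 (PySem.List.len l1) 1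
      = (List.range l1.length).map Int.ofNat := by
    rw [PySem.List.pyRange_one]
    have h0 : ((PySem.List.len l1) - 0).toNat = l1.length := by simp
    rw [h0]
    exact List.map_congr_left (fun k _ => zero_add (Int.ofNat k))
  -- A side
  rw [hrange, List.foldl_map]
  simp only [Int.ofNat_eq_natCast, PySem.List.pyGetD_natCast]
  have hA : (List.range l1.length).foldl
      (fun (st : Int × List Int) k =>
        if l1.getD k ' ' == l2.getD k ' ' then (st.1 + 1, st.2) else (st.1, st.2 ++ [st.1]))
      (0, [])
    = bs.foldl (fun (st : Int × List Int) m =>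
        if m then (st.1 + 1, st.2) else (st.1, st.2 ++ [st.1])) (0, []) := by
    rw [hbs]
    exact (List.foldl_map (f := fun k => l1.getD k ' ' == l2.getD k ' ')
      (g := fun (st : Int × List Int) m =>
        if m then (st.1 + 1, st.2) else (st.1, st.2 ++ [st.1]))).symm
  rw [hA]
  rw [pvFoldA]
  -- B side
  rw [List.map_map]
  have hmatches : (List.range l1.length).map
      ((fun n => PySem.List.pyGetD l1 n ' ' == PySem.List.pyGetD l2 n ' ') ∘ Int.ofNat)
      = bs := by
    apply List.map_congr_left
    intro k _
    simp
  rw [hmatches]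
  rw [pvFoldP]
  have hlenbs : PySem.List.len bs = (bs.length : Int) := by simp
  have hrange2 : PySem.List.pyRange 0 (PySem.List.len bs) 1
      = (List.range bs.length).map Int.ofNat := by
    rw [PySem.List.pyRange_one]
    have h0 : ((PySem.List.len bs) - 0).toNat = bs.length := by simp
    rw [h0]
    exact List.map_congr_left (fun k _ => zero_add (Int.ofNat k))
  rw [hrange2, List.foldl_map]
  simp only [Int.ofNat_eq_natCast, PySem.List.pyGetD_natCast, List.nil_append]
  have hflip : (fun (acc : List Int) (k : Nat) =>
      if bs.getD k false then acc else acc ++ [(pvPre bs 0).getD k 0])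
      = (fun acc k => if (!bs.getD k false) then acc ++ [(pvPre bs 0).getD k 0] else acc) := by
    funext acc k
    cases bs.getD k false <;> simp
  rw [hflip, PySem.List.foldl_append_if]
  simp only [List.nil_append]
  exact (pvCore bs).symm
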